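-- pv_equiv track=rewrite | github.com/NingmengLemon/BiliTools-Remake | biliapis/bilicodes.py | child_zone_to_main_zone
-- ===== SOURCE A (Python) =====
-- video_zone_relation = {  # 主分区与子分区的隶属关系
--     1: [24, 25, 47, 210, 86, 27],
--     13: [33, 32, 51, 152],
--     167: [153, 168, 169, 195, 170],
--     3: [28, 31, 30, 194, 59, 193, 29, 130],
--     129: [20, 198, 199, 200, 154, 156],
--     4: [17, 171, 172, 65, 173, 121, 136, 19],
--     36: [201, 124, 228, 207, 208, 209, 229, 122],
--     188: [95, 230, 231, 232, 233],
--     234: [235, 164, 236, 237, 238],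
--     223: [176, 224, 225, 226, 227],
--     160: [138, 239, 161, 162, 21],
--     211: [76, 212, 213, 214, 215],
--     217: [218, 219, 220, 221, 222, 75],
--     119: [22, 26, 126, 216, 127],
--     155: [157, 158, 159, 192],
--     202: [203, 204, 205, 206],
--     5: [71, 137],
--     181: [182, 183, 85, 184],
--     177: [37, 178, 179, 180],
--     23: [147, 145, 146, 83],
--     11: [185, 187],
-- }
--
-- def child_zone_to_main_zone(tid):
--     if tid in video_zone_relation:
--         return tid
--     relation = list(video_zone_relation.items())
--     for mtid, ctids in relation:
--         if tid in ctids: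
--             return mtid
--     return 0
-- ===== SOURCE B (Python) =====
-- # Flat precomputed child/main -> main lookup table: one dict.get, no scanning.
-- _zone_map = {
--     1: 1,
--     24: 1,
--     25: 1,
--     47: 1,
--     210: 1,
--     86: 1,
--     27: 1,
--     13: 13,
--     33: 13,
--     32: 13,
--     51: 13,
--     152: 13,
--     167: 167,
--     153: 167,
--     168: 167,
--     169: 167,
--     195: 167,
--     170: 167,
--     3: 3,
--     28: 3,
--     31: 3,
--     30: 3,
--     194: 3,
--     59: 3,
--     193: 3,
--     29: 3,
--     130: 3,
--     129: 129,
--     20: 129,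
--     198: 129,
--     199: 129,
--     200: 129,
--     154: 129,
--     156: 129,
--     4: 4,
--     17: 4,
--     171: 4,
--     172: 4,
--     65: 4,
--     173: 4,
--     121: 4,
--     136: 4,
--     19: 4,
--     36: 36,
--     201: 36,
--     124: 36,
--     228: 36,
--     207: 36,
--     208: 36,
--     209: 36,
--     229: 36,
--     122: 36,
--     188: 188,
--     95: 188,
--     230: 188,
--     231: 188,
--     232: 188,
--     233: 188,
--     234: 234,
--     235: 234,
--     164: 234,
--     236: 234,
--     237: 234,
--     238: 234,
--     223: 223,
--     176: 223,
--     224: 223,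
--     225: 223,
--     226: 223,
--     227: 223,
--     160: 160,
--     138: 160,
--     239: 160,
--     161: 160,
--     162: 160,
--     21: 160,
--     211: 211,
--     76: 211,
--     212: 211,
--     213: 211,
--     214: 211,
--     215: 211,
--     217: 217,
--     218: 217,
--     219: 217,
--     220: 217,
--     221: 217,
--     222: 217,
--     75: 217,
--     119: 119,
--     22: 119,
--     26: 119,
--     126: 119,
--     216: 119,
--     127: 119,
--     155: 155,
--     157: 155,
--     158: 155,
--     159: 155,
--     192: 155,
--     202: 202,
--     203: 202,
--     204: 202,
--     205: 202,
--     206: 202,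
--     5: 5,
--     71: 5,
--     137: 5,
--     181: 181,
--     182: 181,
--     183: 181,
--     85: 181,
--     184: 181,
--     177: 177,
--     37: 177,
--     178: 177,
--     179: 177,
--     180: 177,
--     23: 23,
--     147: 23,
--     145: 23,
--     146: 23,
--     83: 23,
--     11: 11,
--     185: 11,
--     187: 11,
-- }
--
-- def child_zone_to_main_zone(tid):
--     return _zone_map.get(tid, 0)
-- ===== Notes on version B (the rewrite author's own statement) =====
-- stated objective: simpler
-- what changed: Replaces the key test plus nested first-match scan over the zone relation by a precomputed flat id->main lookup table, so the function body is a single dict.get(tid, 0).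
import Mathlib
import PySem

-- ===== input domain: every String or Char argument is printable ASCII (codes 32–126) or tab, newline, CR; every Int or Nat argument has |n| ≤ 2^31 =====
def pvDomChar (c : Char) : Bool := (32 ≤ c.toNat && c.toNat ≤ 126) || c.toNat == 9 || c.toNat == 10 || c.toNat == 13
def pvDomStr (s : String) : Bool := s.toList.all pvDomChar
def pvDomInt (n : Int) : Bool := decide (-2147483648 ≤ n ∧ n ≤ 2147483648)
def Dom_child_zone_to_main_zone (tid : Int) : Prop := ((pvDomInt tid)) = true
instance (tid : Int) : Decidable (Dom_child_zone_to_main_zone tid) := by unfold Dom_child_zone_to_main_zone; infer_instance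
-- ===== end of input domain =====

-- B replaces A's key test plus nested first-match scan over the zone relation by a
-- precomputed flat id→main lookup table and a single dict.get (objective: simpler).

-- ===== PORT A =====
-- the module constant video_zone_relation (a dict, as an insertion-ordered association list)
def video_zone_relation : List (Int × List Int) := [((1:Int), [(24:Int), (25:Int), (47:Int), (210:Int), (86:Int), (27:Int)]), ((13:Int), [(33:Int), (32:Int), (51:Int), (152:Int)]), ((167:Int), [(153:Int), (168:Int), (169:Int), (195:Int), (170:Int)]), ((3:Int), [(28:Int), (31:Int), (30:Int), (194:Int), (59:Int), (193:Int), (29:Int), (130:Int)]), ((129:Int), [(20:Int), (198:Int), (199:Int), (200:Int), (154:Int), (156:Int)]), ((4:Int), [(17:Int), (171:Int), (172:Int), (65:Int), (173:Int), (121:Int), (136:Int), (19:Int)]), ((36:Int), [(201:Int), (124:Int), (228:Int), (207:Int), (208:Int), (209:Int), (229:Int), (122:Int)]), ((188:Int), [(95:Int), (230:Int), (231:Int), (232:Int), (233:Int)]), ((234:Int), [(235:Int), (164:Int), (236:Int), (237:Int), (238:Int)]), ((223:Int), [(176:Int), (224:Int), (225:Int), (226:Int), (227:Int)]), ((160:Int),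 [(138:Int), (239:Int), (161:Int), (162:Int), (21:Int)]), ((211:Int), [(76:Int), (212:Int), (213:Int), (214:Int), (215:Int)]), ((217:Int), [(218:Int), (219:Int), (220:Int), (221:Int), (222:Int), (75:Int)]), ((119:Int), [(22:Int), (26:Int), (126:Int), (216:Int), (127:Int)]), ((155:Int), [(157:Int), (158:Int), (159:Int), (192:Int)]), ((202:Int), [(203:Int), (204:Int), (205:Int), (206:Int)]), ((5:Int), [(71:Int), (137:Int)]), ((181:Int), [(182:Int), (183:Int), (85:Int), (184:Int)]), ((177:Int), [(37:Int), (178:Int), (179:Int), (180:Int)]), ((23:Int), [(147:Int), (145:Int), (146:Int), (83:Int)]), ((11:Int), [(185:Int), (187:Int)])]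

-- the 'for mtid, ctids in relation' loop with its early return
def czLoopA : Int → List (Int × List Int) → Int
  | _, [] => 0
  | tid, (mtid, ctids) :: rest => if tid ∈ ctids then mtid else czLoopA tid rest

def child_zone_to_main_zone (tid : Int) : Int :=
  if tid ∈ video_zone_relation.map Prod.fst then tid
  else czLoopA tid video_zone_relation

-- ===== PORT B =====
-- Source B's module constant _zone_map: the flat precomputed id→main table (a dict literal
-- with distinct keys, as an insertion-ordered association list)
def zone_map : PySem.Dict Int Int := PySem.Dict.mk [((1:Int), (1:Int)), ((24:Int), (1:Int)), ((25:Int), (1:Int)), ((47:Int), (1:Int)), ((210:Int), (1:Int)), ((86:Int), (1:Int)), ((27:Int), (1:Int)), ((13:Int), (13:Int)), ((33:Int), (13:Int)), ((32:Int), (13:Int)), ((51:Int), (13:Int)), ((152:Int), (13:Int)), ((167:Int), (167:Int)), ((153:Int), (167:Int)), ((168:Int), (167:Int)), ((169:Int), (167:Int)), ((195:Int), (167:Int)), ((170:Int), (167:Int)), ((3:Int), (3:Int)), ((28:Int), (3:Int)), ((31:Int), (3:Int)), ((30:Int), (3:Int)), ((194:Int), (3:Int)), ((59:Int), (3:Int)),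 ((193:Int), (3:Int)), ((29:Int), (3:Int)), ((130:Int), (3:Int)), ((129:Int), (129:Int)), ((20:Int), (129:Int)), ((198:Int), (129:Int)), ((199:Int), (129:Int)), ((200:Int), (129:Int)), ((154:Int), (129:Int)), ((156:Int), (129:Int)), ((4:Int), (4:Int)), ((17:Int), (4:Int)), ((171:Int), (4:Int)), ((172:Int), (4:Int)), ((65:Int), (4:Int)), ((173:Int), (4:Int)), ((121:Int), (4:Int)), ((136:Int), (4:Int)), ((19:Int), (4:Int)), ((36:Int), (36:Int)), ((201:Int), (36:Int)), ((124:Int), (36:Int)), ((228:Int), (36:Int)), ((207:Int), (36:Int)), ((208:Int), (36:Int)), ((209:Int), (36:Int)), ((229:Int), (36:Int)), ((122:Int), (36:Int)), ((188:Int), (188:Int)), ((95:Int), (188:Int)), ((230:Int), (188:Int)), ((231:Int), (188:Int)), ((232:Int), (188:Int)), ((233:Int), (188:Int)), ((234:Int), (234:Int)), ((235:Int), (234:Int)), ((164:Int), (234:Int)), ((236:Int), (234:Int)), ((237:Int), (234:Int)), ((238:Int), (234:Int)), ((223:Int), (223:Int)), ((176:Int), (223:Int)), ((224:Int), (223:Int)),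 ((225:Int), (223:Int)), ((226:Int), (223:Int)), ((227:Int), (223:Int)), ((160:Int), (160:Int)), ((138:Int), (160:Int)), ((239:Int), (160:Int)), ((161:Int), (160:Int)), ((162:Int), (160:Int)), ((21:Int), (160:Int)), ((211:Int), (211:Int)), ((76:Int), (211:Int)), ((212:Int), (211:Int)), ((213:Int), (211:Int)), ((214:Int), (211:Int)), ((215:Int), (211:Int)), ((217:Int), (217:Int)), ((218:Int), (217:Int)), ((219:Int), (217:Int)), ((220:Int), (217:Int)), ((221:Int), (217:Int)), ((222:Int), (217:Int)), ((75:Int), (217:Int)), ((119:Int), (119:Int)), ((22:Int), (119:Int)), ((26:Int), (119:Int)), ((126:Int), (119:Int)), ((216:Int), (119:Int)), ((127:Int), (119:Int)), ((155:Int), (155:Int)), ((157:Int), (155:Int)), ((158:Int), (155:Int)), ((159:Int), (155:Int)), ((192:Int), (155:Int)), ((202:Int), (202:Int)), ((203:Int), (202:Int)), ((204:Int), (202:Int)), ((205:Int), (202:Int)), ((206:Int), (202:Int)), ((5:Int), (5:Int)), ((71:Int), (5:Int)), ((137:Int), (5:Int)), ((181:Int), (181:Int)), ((182:Int), (181:Int)),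 ((183:Int), (181:Int)), ((85:Int), (181:Int)), ((184:Int), (181:Int)), ((177:Int), (177:Int)), ((37:Int), (177:Int)), ((178:Int), (177:Int)), ((179:Int), (177:Int)), ((180:Int), (177:Int)), ((23:Int), (23:Int)), ((147:Int), (23:Int)), ((145:Int), (23:Int)), ((146:Int), (23:Int)), ((83:Int), (23:Int)), ((11:Int), (11:Int)), ((185:Int), (11:Int)), ((187:Int), (11:Int))]

def child_zone_to_main_zone_alt (tid : Int) : Int :=
  zone_map.getD tid 0

-- ===== PRECONDITION & SPEC =====
def Spec_child_zone_to_main_zone (tid : Int) (out : Int) : Prop := out = child_zone_to_main_zone_alt tid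
instance (tid : Int) (out : Int) : Decidable (Spec_child_zone_to_main_zone tid out) := by unfold Spec_child_zone_to_main_zone; infer_instance

-- ===== CLAIM (what is proved, stated in full; the proofs are below) =====
def Claim_equal_child_zone_to_main_zone : Prop := ∀ (tid : Int), Dom_child_zone_to_main_zone tid → Spec_child_zone_to_main_zone tid (child_zone_to_main_zone tid)

-- ===== LEMMAS AND PROOFS =====

-- every id occurring anywhere in the relation (= the keys of the flat table)
def allZoneIds : List Int := [(1:Int), (24:Int), (25:Int), (47:Int), (210:Int), (86:Int), (27:Int), (13:Int), (33:Int), (32:Int), (51:Int), (152:Int), (167:Int), (153:Int), (168:Int), (169:Int), (195:Int), (170:Int), (3:Int), (28:Int), (31:Int), (30:Int), (194:Int), (59:Int), (193:Int), (29:Int), (130:Int), (129:Int), (20:Int), (198:Int), (199:Int), (200:Int), (154:Int), (156:Int), (4:Int), (17:Int), (171:Int), (172:Int), (65:Int), (173:Int), (121:Int), (136:Int), (19:Int), (36:Int), (201:Int), (124:Int), (228:Int), (207:Int), (208:Int), (209:Int), (229:Int), (122:Int), (188:Int), (95:Int), (230:Int), (231:Int), (232:Int), (233:Int), (234:Int),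 (235:Int), (164:Int), (236:Int), (237:Int), (238:Int), (223:Int), (176:Int), (224:Int), (225:Int), (226:Int), (227:Int), (160:Int), (138:Int), (239:Int), (161:Int), (162:Int), (21:Int), (211:Int), (76:Int), (212:Int), (213:Int), (214:Int), (215:Int), (217:Int), (218:Int), (219:Int), (220:Int), (221:Int), (222:Int), (75:Int), (119:Int), (22:Int), (26:Int), (126:Int), (216:Int), (127:Int), (155:Int), (157:Int), (158:Int), (159:Int), (192:Int), (202:Int), (203:Int), (204:Int), (205:Int), (206:Int), (5:Int), (71:Int), (137:Int), (181:Int), (182:Int), (183:Int), (85:Int), (184:Int), (177:Int), (37:Int), (178:Int), (179:Int), (180:Int), (23:Int), (147:Int), (145:Int), (146:Int), (83:Int), (11:Int), (185:Int), (187:Int)]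

-- generic: the scan returns 0 when tid is in no child list
theorem czLoopA_eq_zero (tid : Int) (L : List (Int × List Int))
    (h : ∀ p ∈ L, tid ∉ p.2) : czLoopA tid L = 0 := by
  induction L with
  | nil => rfl
  | cons p rest ih =>
    obtain ⟨m, cs⟩ := p
    simp only [czLoopA]
    rw [if_neg (h (m, cs) (List.mem_cons_self))]
    exact ih (fun q hq => h q (List.mem_cons_of_mem _ hq))

set_option maxRecDepth 8192 in
theorem keys_sub : ∀ k ∈ PySem.Dict.keys zone_map, k ∈ allZoneIds := by decide

theorem mains_sub : ∀ k ∈ video_zone_relation.map Prod.fst, k ∈ allZoneIds := by decide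

theorem children_sub : ∀ p ∈ video_zone_relation, ∀ c ∈ p.2, c ∈ allZoneIds := by decide

-- ===== VERDICT (by name: the statement is the Claim_ definition above) =====
set_option maxRecDepth 8192 in
theorem child_zone_to_main_zone_spec : Claim_equal_child_zone_to_main_zone := by
  intro tid _
  unfold Spec_child_zone_to_main_zone
  by_cases h : tid ∈ allZoneIds
  · fin_cases h <;> decide
  · have hA : child_zone_to_main_zone tid = 0 := by
      unfold child_zone_to_main_zone
      rw [if_neg (fun hm => h (mains_sub tid hm))]
      exact czLoopA_eq_zero tid _ (fun p hp hc => h (children_sub p hp tid hc))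
    have hcon : zone_map.contains tid = false := by
      rw [PySem.Dict.contains_eq_decide_mem_keys]
      simp only [decide_eq_false_iff_not]
      exact fun hm => h (keys_sub tid hm)
    rw [hA, child_zone_to_main_zone_alt, PySem.Dict.getD_of_not_contains _ _ hcon]
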